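-- pv_equiv track=rewrite | github.com/iksnagreb/attention-dummy | make_folding.py | factorize_mvau_folding_product
-- ===== SOURCE A (Python) =====
-- import math
--
-- def factorize_mvau_folding_product(emb_dim, mlp_dim, seq_len):
--     # Compute the folding product constraining the parallelization of the MVAU
--     # to achieve the T^2 cycles per sample target
--     mvau_folding_product = emb_dim * mlp_dim // seq_len
--
--     # If the folding product is below 1, there is no need to parallelize at all,
--     # as the model is fully dominated by the sequence length, i.e., even fully
--     # sequential MVAU would still achieve the T^2 cycles per sample target
--     if mvau_folding_product <= 1:
--         # No parallelization
--         return 1, 1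
--
--     # Checks whether n is a common divisor of both MVAU dimensions, i.e., input
--     # and output
--     def common_divisor(n):
--         return (emb_dim % n == 0) and (mlp_dim % n == 0)
--
--     # Common divisors of the input/output dimensions of the MVAU, these are all
--     # the candidate folding configurations
--     common_divisors = [
--         n for n in range(1, min(emb_dim, mlp_dim)) if common_divisor(n)
--     ]
--     # Generate all possible SIMD-PE pairings and take the first one giving the
--     # specified product. Only consider folding configurations from the set of
--     # common divisors here.
--     for simd in common_divisors:  # noqa
--         for pe in common_divisors:  # noqa
--             # Check whether this combination is a factorization of the folding
--             # product, i.e., fulfills the T^2 cycles per sample folding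
--             # constraint
--             if simd * pe == mvau_folding_product:
--                 # Exit here with the first solution
--                 return simd, pe
--
--     # No suitable folding configuration has been found, at this point only the
--     # trivial folding remains possible, if the folding product divides both
--     # dimensions.
--     if common_divisor(mvau_folding_product):
--         # Fallback to trivial factorization if no other combinations are
--         # possible
--         return 1, mvau_folding_product
--
--     # No factorization of the folding constraint with factors from the set of
--     # common divisors found, not even the trivial one. The best we can do now is
--     # to get as close as possible to this constraint by taking the greatest
--     # common divisor.
--     return 1, math.gcd(emb_dim, mlp_dim)
-- ===== SOURCE B (Python) =====
-- import math
--
-- def factorize_mvau_folding_product(emb_dim, mlp_dim, seq_len):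
--     # Single pass: for each candidate simd, compute the unique cofactor
--     # directly instead of scanning a precomputed divisor list for it.
--     product = emb_dim * mlp_dim // seq_len
--     if product <= 1:
--         return 1, 1
--     m = min(emb_dim, mlp_dim)
--
--     def common_divisor(n):
--         return (emb_dim % n == 0) and (mlp_dim % n == 0)
--
--     for simd in range(1, m):
--         if common_divisor(simd) and product % simd == 0:
--             pe = product // simd
--             if pe < m and common_divisor(pe):
--                 return simd, pe
--
--     if common_divisor(product):
--         return 1, product
--     return 1, math.gcd(emb_dim, mlp_dim)
-- ===== Notes on version B (the rewrite author's own statement) =====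
-- stated objective: simpler
-- what changed: Replaced A's precomputed common-divisor list plus O(D^2) nested SIMD x PE scan with a single range pass that, for each common-divisor candidate simd dividing the product, computes the unique cofactor product//simd directly and checks it is a common divisor below min(emb_dim, mlp_dim); fallbacks unchanged.
import Mathlib
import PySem

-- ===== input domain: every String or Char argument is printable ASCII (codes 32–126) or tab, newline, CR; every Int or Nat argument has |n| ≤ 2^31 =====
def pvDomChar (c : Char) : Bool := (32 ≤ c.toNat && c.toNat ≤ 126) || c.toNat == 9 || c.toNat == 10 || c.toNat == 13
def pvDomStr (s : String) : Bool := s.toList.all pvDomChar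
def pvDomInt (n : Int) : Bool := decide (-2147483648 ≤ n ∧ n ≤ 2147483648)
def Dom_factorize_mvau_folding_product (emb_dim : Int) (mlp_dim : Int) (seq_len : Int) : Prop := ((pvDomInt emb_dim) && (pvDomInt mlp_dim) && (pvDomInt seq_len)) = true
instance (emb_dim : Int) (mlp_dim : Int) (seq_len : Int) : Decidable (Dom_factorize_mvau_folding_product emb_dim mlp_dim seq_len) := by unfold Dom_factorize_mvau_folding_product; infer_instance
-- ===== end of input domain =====

-- B replaces A's precomputed common-divisor list and O(D^2) nested SIMD×PE scan by a single
-- pass that computes each candidate's unique cofactor directly (objective: simpler).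

-- ===== PORT A =====
-- the inner helper `common_divisor` (identical in both Pythons)
def pyCommonDivisor (emb_dim mlp_dim n : Int) : Bool :=
  PySem.Int.mod emb_dim n == 0 && PySem.Int.mod mlp_dim n == 0

-- inner `for pe in common_divisors` loop with early return
def pvAInner (simd : Int) (cds : List Int) (product : Int) : Option Int :=
  match cds with
  | [] => none
  | pe :: rest => if simd * pe == product then some pe else pvAInner simd rest product

-- outer `for simd in common_divisors` loop with early return
def pvAOuter (cds all : List Int) (product : Int) : Option (Int × Int) :=
  match cds with
  | [] => none
  | simd :: rest =>
    match pvAInner simd all product with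
    | some pe => some (simd, pe)
    | none => pvAOuter rest all product

def factorize_mvau_folding_product (emb_dim : Int) (mlp_dim : Int) (seq_len : Int) : List Int :=
  let mvau_folding_product := PySem.Int.floordiv (emb_dim * mlp_dim) seq_len
  if mvau_folding_product ≤ 1 then [1, 1]
  else
    let common_divisors :=
      (PySem.List.pyRange 1 (min emb_dim mlp_dim) 1).filter
        (fun n => pyCommonDivisor emb_dim mlp_dim n)
    match pvAOuter common_divisors common_divisors mvau_folding_product with
    | some (simd, pe) => [simd, pe]
    | none =>
      if pyCommonDivisor emb_dim mlp_dim mvau_folding_product then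
        [1, mvau_folding_product]
      else
        [1, (Int.gcd emb_dim mlp_dim : Int)]

-- ===== PORT B =====
-- single `for simd in range(1, m)` loop: the cofactor is computed, not searched for
def pvBLoop (emb_dim mlp_dim m product : Int) (xs : List Int) : Option (Int × Int) :=
  match xs with
  | [] => none
  | simd :: rest =>
    if pyCommonDivisor emb_dim mlp_dim simd && PySem.Int.mod product simd == 0 then
      let pe := PySem.Int.floordiv product simd
      if pe < m && pyCommonDivisor emb_dim mlp_dim pe then some (simd, pe)
      else pvBLoop emb_dim mlp_dim m product rest
    else pvBLoop emb_dim mlp_dim m product rest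

def factorize_mvau_folding_product_alt (emb_dim : Int) (mlp_dim : Int) (seq_len : Int) : List Int :=
  let product := PySem.Int.floordiv (emb_dim * mlp_dim) seq_len
  if product ≤ 1 then [1, 1]
  else
    let m := min emb_dim mlp_dim
    match pvBLoop emb_dim mlp_dim m product (PySem.List.pyRange 1 m 1) with
    | some (simd, pe) => [simd, pe]
    | none =>
      if pyCommonDivisor emb_dim mlp_dim product then [1, product]
      else [1, (Int.gcd emb_dim mlp_dim : Int)]

-- ===== PRECONDITION & SPEC =====
-- A raises ZeroDivisionError exactly when seq_len = 0 (the initial floor division).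
def Pre_factorize_mvau_folding_product (emb_dim : Int) (mlp_dim : Int) (seq_len : Int) : Prop := seq_len ≠ 0
instance (emb_dim : Int) (mlp_dim : Int) (seq_len : Int) : Decidable (Pre_factorize_mvau_folding_product emb_dim mlp_dim seq_len) := by unfold Pre_factorize_mvau_folding_product; infer_instance
def pvWitness_factorize_mvau_folding_product : Int × Int × Int := (8, 12, 2)

def Spec_factorize_mvau_folding_product (emb_dim : Int) (mlp_dim : Int) (seq_len : Int) (out : List Int) : Prop := out = factorize_mvau_folding_product_alt emb_dim mlp_dim seq_len
instance (emb_dim : Int) (mlp_dim : Int) (seq_len : Int) (out : List Int) : Decidable (Spec_factorize_mvau_folding_product emb_dim mlp_dim seq_len out) := by unfold Spec_factorize_mvau_folding_product; infer_instance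

-- ===== CLAIM (what is proved, stated in full; the proofs are below) =====
def Claim_equal_factorize_mvau_folding_product : Prop := ∀ (emb_dim : Int) (mlp_dim : Int) (seq_len : Int), Dom_factorize_mvau_folding_product emb_dim mlp_dim seq_len → Pre_factorize_mvau_folding_product emb_dim mlp_dim seq_len → Spec_factorize_mvau_folding_product emb_dim mlp_dim seq_len (factorize_mvau_folding_product emb_dim mlp_dim seq_len)

-- ===== LEMMAS AND PROOFS =====

-- A's inner scan finds the first (hence, simd > 0, the unique) pe with simd*pe = product
theorem pvAInner_char (simd product : Int) (hs : 0 < simd) (cds : List Int) :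
    pvAInner simd cds product =
      if product % simd = 0 ∧ product / simd ∈ cds then some (product / simd) else none := by
  induction cds with
  | nil => simp [pvAInner]
  | cons pe rest ih =>
    simp only [pvAInner, ih]
    by_cases h : simd * pe = product
    · have hpe : pe = product / simd := by
        rw [← h, Int.mul_ediv_cancel_left _ (by omega)]
      have hmod : product % simd = 0 := by
        rw [← h]; exact Int.mul_emod_right _ _
      have hb : (simd * pe == product) = true := by simpa using h
      rw [if_pos hb, if_pos ⟨hmod, by rw [← hpe]; exact List.mem_cons_self ..⟩, hpe]
    · have hb : (simd * pe == product) = false := by simpa using h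
      by_cases hm : product % simd = 0
      · have hdvd : simd ∣ product := Int.dvd_of_emod_eq_zero hm
        have hne : product / simd ≠ pe := by
          intro he
          exact h (by rw [← he]; exact Int.mul_ediv_cancel' hdvd)
        simp [hb, hm, List.mem_cons, hne]
      · simp [hb, hm]

-- positivity of the exact quotient
theorem quot_pos (product n : Int) (hp : 1 < product) (hn : 0 < n) (hd : product % n = 0) :
    1 ≤ product / n := by
  have hdvd : n ∣ product := Int.dvd_of_emod_eq_zero hd
  obtain ⟨k, hk⟩ := hdvd
  have hk' : product / n = k := by rw [hk, Int.mul_ediv_cancel_left _ (by omega)]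
  have : 0 < k := by nlinarith
  omega

-- main loop correspondence: A's outer scan over the filtered list equals B's single pass
theorem loop_eq (emb_dim mlp_dim m product : Int) (hp : 1 < product)
    (all : List Int)
    (hall : ∀ pe : Int, pe ∈ all ↔ (1 ≤ pe ∧ pe < m ∧ pyCommonDivisor emb_dim mlp_dim pe = true)) :
    ∀ xs : List Int, (∀ n ∈ xs, 0 < n) →
      pvAOuter (xs.filter (fun n => pyCommonDivisor emb_dim mlp_dim n)) all product =
        pvBLoop emb_dim mlp_dim m product xs := by
  intro xs
  induction xs with
  | nil => intro _; simp [pvAOuter, pvBLoop]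
  | cons n rest ih =>
    intro hpos
    have hn : 0 < n := hpos n (by simp)
    have hrest : ∀ k ∈ rest, 0 < k := fun k hk => hpos k (by simp [hk])
    by_cases hcd : pyCommonDivisor emb_dim mlp_dim n = true
    · rw [List.filter_cons_of_pos (by simpa using hcd)]
      simp only [pvAOuter, pvBLoop]
      rw [pvAInner_char n product hn all]
      rw [PySem.Int.mod_eq_emod_of_pos hn, PySem.Int.floordiv_eq_ediv_of_pos hn]
      by_cases hm : product % n = 0
      · by_cases hmem : product / n ∈ all
        · have hb := (hall (product / n)).1 hmem
          simp [hcd, hm, hmem, hb.2.1, hb.2.2]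
        · have hq : 1 ≤ product / n := quot_pos product n hp hn hm
          have hb : ¬ (product / n < m ∧ pyCommonDivisor emb_dim mlp_dim (product / n) = true) := by
            intro hc; exact hmem ((hall _).2 ⟨hq, hc.1, hc.2⟩)
          rw [if_neg (by simp [hm, hmem])]
          rw [if_pos (by simp [hcd, hm])]
          rw [if_neg (by simpa using hb)]
          exact ih hrest
      · rw [if_neg (by simp [hm])]
        rw [if_neg (by simp [hcd, hm])]
        exact ih hrest
    · rw [List.filter_cons_of_neg (by simpa using hcd)]
      simp only [pvBLoop]
      rw [if_neg (by simp [hcd])]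
      exact ih hrest

-- ===== VERDICT (by name: the statement is the Claim_ definition above) =====
theorem factorize_mvau_folding_product_spec : Claim_equal_factorize_mvau_folding_product := by
  intro emb_dim mlp_dim seq_len _ _
  unfold Spec_factorize_mvau_folding_product factorize_mvau_folding_product factorize_mvau_folding_product_alt
  set product := PySem.Int.floordiv (emb_dim * mlp_dim) seq_len with hprod
  by_cases hle : product ≤ 1
  · simp [hle]
  · simp only [if_neg hle]
    have hp : 1 < product := by omega
    set m := min emb_dim mlp_dim with hm
    have hkey := loop_eq emb_dim mlp_dim m product hp
      ((PySem.List.pyRange 1 m 1).filter (fun n => pyCommonDivisor emb_dim mlp_dim n))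
      (by
        intro pe
        simp [List.mem_filter, PySem.List.mem_pyRange_one, and_assoc])
      (PySem.List.pyRange 1 m 1)
      (by
        intro n hn
        have := (PySem.List.mem_pyRange_one).1 hn
        omega)
    rw [hkey]
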